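-- pv_equiv track=rewrite | github.com/sricharan22/Elective-4 | 02-nearestkaprekarnumber-Python/nearestkaprekarnumber.py | fun_nearestkaprekarnumber
-- ===== SOURCE A (Python) =====
-- def isKaprekar(n):
--     if(n == 1):
--         return True
--     x = n ** 2
--     if(len(str(x)) > 1):
--         left = int(str(x)[:len(str(x))//2])
--         right = int(str(x)[len(str(x))//2:])
--         if(left + right == n):
--             return True
--         else:
--             return False
--     else:
--         return False
--
-- def fun_nearestkaprekarnumber(n):
--     left = 0
--     right = 0
--     for i in range(n,0,-1):
--         if isKaprekar(i):
--             left = i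
--             break
--     for i in range(n,n+10000,1):
--         if isKaprekar(i):
--             right = i
--             break
--     x = left if n - left <= right - n else right
--     return x
-- ===== SOURCE B (Python) =====
-- def isKaprekar(n):
--     if(n == 1):
--         return True
--     x = n ** 2
--     if(len(str(x)) > 1):
--         left = int(str(x)[:len(str(x))//2])
--         right = int(str(x)[len(str(x))//2:])
--         if(left + right == n):
--             return True
--         else:
--             return False
--     else:
--         return False
--
-- def fun_nearestkaprekarnumber(n):
--     # Only Kaprekar numbers within 9999 of n can influence the answer:
--     # build the table of Kaprekar numbers in that window, then query it.
--     ks = [k for k in range(n - 9999, n + 10000) if isKaprekar(k)]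
--     left = max((k for k in ks if 1 <= k <= n), default=0)
--     right = min((k for k in ks if n <= k), default=0)
--     return left if n - left <= right - n else right
-- ===== Notes on version B (the rewrite author's own statement) =====
-- stated objective: alternative
-- what changed: A runs two early-exit directional scans (downward from n as far as needed, plus up to 10000 upward); B builds the table of Kaprekar numbers in the window [n-9999, n+9999] in one pass and answers by max/min queries on it, doing a bounded number of Kaprekar tests per call.
import Mathlib
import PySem

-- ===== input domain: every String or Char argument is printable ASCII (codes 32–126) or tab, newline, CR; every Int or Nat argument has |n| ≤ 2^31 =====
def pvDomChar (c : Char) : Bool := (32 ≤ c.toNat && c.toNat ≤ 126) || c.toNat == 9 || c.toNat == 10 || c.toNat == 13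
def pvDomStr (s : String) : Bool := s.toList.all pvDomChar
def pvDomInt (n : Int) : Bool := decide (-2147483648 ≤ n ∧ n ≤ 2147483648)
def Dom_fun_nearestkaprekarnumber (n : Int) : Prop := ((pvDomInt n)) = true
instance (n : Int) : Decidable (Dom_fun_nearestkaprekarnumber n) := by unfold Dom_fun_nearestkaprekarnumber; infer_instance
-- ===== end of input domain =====

-- ===== PORT A =====
-- B replaces the two early-exit directional scans with a build-the-window-table-then-query search; return values proved equal on all inputs.
-- shared helper: the Kaprekar test, transliterated from the Python helper isKaprekar (identical in Source A and Source B)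
def isKaprekar (n : Int) : Bool :=
  if n == 1 then true
  else
    let x := n ^ 2
    if (PySem.Int.toChars x).length > 1 then
      -- int() here parses a nonempty digit substring of str(x), which never raises, so getD 0 is never taken
      let left := (PySem.Int.ofChars? (PySem.List.slice (PySem.Int.toChars x) none (some (PySem.Int.floordiv ((PySem.Int.toChars x).length : Int) 2)))).getD 0
      let right := (PySem.Int.ofChars? (PySem.List.slice (PySem.Int.toChars x) (some (PySem.Int.floordiv ((PySem.Int.toChars x).length : Int) 2)) none)).getD 0
      if left + right == n then true else false
    else false

def fun_nearestkaprekarnumber (n : Int) : Int :=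
  -- first loop: scan n,n-1,…,1 and break at the first Kaprekar number
  let left := ((PySem.List.pyRange n 0 (-1)).find? isKaprekar).getD 0
  -- second loop: scan n,n+1,…,n+9999 and break at the first Kaprekar number
  let right := ((PySem.List.pyRange n (n + 10000) 1).find? isKaprekar).getD 0
  if n - left ≤ right - n then left else right

-- ===== PORT B =====
def fun_nearestkaprekarnumber_alt (n : Int) : Int :=
  let ks := (PySem.List.pyRange (n - 9999) (n + 10000) 1).filter isKaprekar
  let left := PySem.List.maxD (ks.filter (fun k => decide (1 ≤ k) && decide (k ≤ n))) (fun x => x) 0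
  let right := PySem.List.minD (ks.filter (fun k => decide (n ≤ k))) (fun x => x) 0
  if n - left ≤ right - n then left else right

-- ===== PRECONDITION & SPEC =====
def Spec_fun_nearestkaprekarnumber (n : Int) (out : Int) : Prop := out = fun_nearestkaprekarnumber_alt n
instance (n : Int) (out : Int) : Decidable (Spec_fun_nearestkaprekarnumber n out) := by unfold Spec_fun_nearestkaprekarnumber; infer_instance

-- ===== CLAIM (what is proved, stated in full; the proofs are below) =====
def Claim_equal_fun_nearestkaprekarnumber : Prop := ∀ (n : Int), Dom_fun_nearestkaprekarnumber n → Spec_fun_nearestkaprekarnumber n (fun_nearestkaprekarnumber n)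

-- ===== LEMMAS AND PROOFS =====

theorem pvEqOfPairwiseLtMem {l1 l2 : List Int} (h1 : l1.Pairwise (· < ·))
    (h2 : l2.Pairwise (· < ·)) (hm : ∀ x, x ∈ l1 ↔ x ∈ l2) : l1 = l2 := by
  have hp : l1.Perm l2 := by
    rw [List.perm_ext_iff_of_nodup h1.nodup h2.nodup]; exact hm
  exact hp.eq_of_pairwise (fun a b _ _ hab hba => le_antisymm hab hba)
    (h1.imp le_of_lt) (h2.imp le_of_lt)

theorem pvFilterGe (a b c : Int) (p : Int → Bool) :
    ((PySem.List.pyRange a b 1).filter p).filter (fun k => decide (c ≤ k)) = (PySem.List.pyRange (max a c) b 1).filter p := by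
  rw [List.filter_comm]
  congr 1
  refine pvEqOfPairwiseLtMem ((PySem.List.pairwise_lt_pyRange_one a b).filter _) (PySem.List.pairwise_lt_pyRange_one _ b) ?_
  intro x
  simp only [List.mem_filter, PySem.List.mem_pyRange_one, decide_eq_true_eq]
  omega

theorem pvFilterBetween (a b c d : Int) (p : Int → Bool) :
    ((PySem.List.pyRange a b 1).filter p).filter (fun k => decide (c ≤ k) && decide (k ≤ d)) =
      (PySem.List.pyRange (max a c) (min b (d + 1)) 1).filter p := by
  rw [List.filter_comm]
  congr 1
  refine pvEqOfPairwiseLtMem ((PySem.List.pairwise_lt_pyRange_one a b).filter _) (PySem.List.pairwise_lt_pyRange_one _ _) ?_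
  intro x
  simp only [List.mem_filter, PySem.List.mem_pyRange_one, Bool.and_eq_true, decide_eq_true_eq]
  omega

theorem pvMinPairwise (l : List Int) (h : l.Pairwise (· < ·)) :
    PySem.List.min? l (fun x => x) = l.head? := by
  cases l with
  | nil => rfl
  | cons x t =>
    simp only [PySem.List.min?, List.foldl_cons, List.head?_cons]
    induction t generalizing x with
    | nil => rfl
    | cons y t ih =>
      have hxy : x < y := List.rel_of_pairwise_cons h (by simp)
      simp only [List.foldl_cons]
      rw [if_neg (by omega)]
      exact ih x (h.sublist (by simp [List.cons_sublist_cons]))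

theorem pvMaxPairwise (l : List Int) (h : l.Pairwise (· < ·)) :
    PySem.List.max? l (fun x => x) = l.getLast? := by
  induction l using List.reverseRecOn with
  | nil => rfl
  | append_singleton t b ih =>
    rw [List.pairwise_append] at h
    obtain ⟨ht, -, hb⟩ := h
    simp only [PySem.List.max?, List.foldl_append, List.foldl_cons, List.foldl_nil] at *
    rw [ih ht, List.getLast?_concat]
    cases hl : t.getLast? with
    | none => rfl
    | some m =>
      have hm : m ∈ t := List.mem_of_getLast? hl
      have : m < b := hb m hm b (by simp)
      simp [this]

-- ===== VERDICT (by name: the statement is the Claim_ definition above) =====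
theorem fun_nearestkaprekarnumber_spec : Claim_equal_fun_nearestkaprekarnumber := by
  intro n _
  unfold Spec_fun_nearestkaprekarnumber
  simp only [fun_nearestkaprekarnumber, fun_nearestkaprekarnumber_alt]
  -- rights agree
  have hr2 : ((PySem.List.pyRange (n - 9999) (n + 10000) 1).filter isKaprekar).filter (fun k => decide (n ≤ k)) = (PySem.List.pyRange n (n + 10000) 1).filter isKaprekar := by
    rw [pvFilterGe]; congr 2; omega
  have hrightB : PySem.List.minD (((PySem.List.pyRange (n - 9999) (n + 10000) 1).filter isKaprekar).filter (fun k => decide (n ≤ k))) (fun x => x) 0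
      = (((PySem.List.pyRange n (n + 10000) 1).filter isKaprekar).head?).getD 0 := by
    rw [PySem.List.minD, hr2, pvMinPairwise _ ((PySem.List.pairwise_lt_pyRange_one _ _).filter _)]
  have hrightA : ((PySem.List.pyRange n (n + 10000) 1).find? isKaprekar).getD 0
      = (((PySem.List.pyRange n (n + 10000) 1).filter isKaprekar).head?).getD 0 := by
    rw [List.head?_filter]
  -- lefts
  have hleftA : ((PySem.List.pyRange n 0 (-1)).find? isKaprekar).getD 0
      = ((((PySem.List.pyRange 1 (n + 1) 1).filter isKaprekar).getLast?)).getD 0 := by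
    rw [PySem.List.pyRange_neg_one_eq_reverse, ← List.head?_filter, List.filter_reverse,
      List.head?_reverse]
    norm_num
  have hl1 : ((PySem.List.pyRange (n - 9999) (n + 10000) 1).filter isKaprekar).filter (fun k => decide (1 ≤ k) && decide (k ≤ n))
      = (PySem.List.pyRange (max (n - 9999) 1) (n + 1) 1).filter isKaprekar := by
    rw [pvFilterBetween]; congr 2; omega
  have hleftB : PySem.List.maxD (((PySem.List.pyRange (n - 9999) (n + 10000) 1).filter isKaprekar).filter (fun k => decide (1 ≤ k) && decide (k ≤ n))) (fun x => x) 0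
      = (((PySem.List.pyRange (max (n - 9999) 1) (n + 1) 1).filter isKaprekar).getLast?).getD 0 := by
    rw [PySem.List.maxD, hl1, pvMaxPairwise _ ((PySem.List.pairwise_lt_pyRange_one _ _).filter _)]
  rw [hrightB, hrightA, hleftA, hleftB]
  set r := (((PySem.List.pyRange n (n + 10000) 1).filter isKaprekar).head?).getD 0 with hr
  have hrbound : r = 0 ∨ (n ≤ r ∧ r < n + 10000) := by
    rcases hh : ((PySem.List.pyRange n (n + 10000) 1).filter isKaprekar).head? with _ | rr
    · left; rw [hr, hh]; rfl
    · right
      have : rr ∈ (PySem.List.pyRange n (n + 10000) 1).filter isKaprekar := List.mem_of_mem_head? hh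
      have := (List.mem_filter.mp this).1
      rw [PySem.List.mem_pyRange_one] at this
      rw [hr, hh]
      simpa using this
  by_cases hM : max (n - 9999) 1 = 1
  · rw [hM]
  · -- n ≥ 10001
    have hn : 10001 ≤ n := by omega
    have hsplit : PySem.List.pyRange 1 (n + 1) 1
        = PySem.List.pyRange 1 (max (n - 9999) 1) 1 ++ PySem.List.pyRange (max (n - 9999) 1) (n + 1) 1 :=
      PySem.List.pyRange_one_append 1 _ _ (by omega) (by omega)
    rw [hsplit, List.filter_append, List.getLast?_append]
    rcases hv : ((PySem.List.pyRange (max (n - 9999) 1) (n + 1) 1).filter isKaprekar).getLast? with _ | x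
    · -- window empty: B's left is 0
      simp only [Option.none_or]
      rcases hu : ((PySem.List.pyRange 1 (max (n - 9999) 1) 1).filter isKaprekar).getLast? with _ | L
      · rfl
      · have hLmem : L ∈ (PySem.List.pyRange 1 (max (n - 9999) 1) 1).filter isKaprekar := List.mem_of_getLast? hu
        have hLb := (List.mem_filter.mp hLmem).1
        rw [PySem.List.mem_pyRange_one] at hLb
        simp only [Option.getD_some, Option.getD_none]
        rw [if_neg (by omega), if_neg (by omega)]
    · rfl
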